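-- pv_equiv track=rewrite | github.com/EwwPhysics/scioly-results | scilympiad_scraper.py | superscore
-- ===== SOURCE A (Python) =====
-- def superscore(data):
--     combined_results = {}
--     for school in data:
--         if "," in school:
--             school_name = school[:school.find(',')]
--             if school_name not in combined_results:
--                 combined_results[school_name] = data[school]
--             else:
--                 for event in combined_results[school_name]:
--                     if data[school][event] < combined_results[school_name][event]:
--                         combined_results[school_name][event] = data[school][event]
--     return combined_results
-- ===== SOURCE B (Python) =====
-- def superscore(data):
--     # Two-pass: group the comma-named schools' score dicts by name prefix,
--     # then fold each group down to its per-event minimum.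
--     # Like A, this mutates the group's first score dict in place (return value
--     # is what the equivalence claim is about; the mutation matches A's anyway).
--     groups = {}
--     for school in data:
--         i = school.find(',')
--         if i != -1:
--             groups.setdefault(school[:i], []).append(data[school])
--     out = {}
--     for name, ds in groups.items():
--         acc = ds[0]
--         for later in ds[1:]:
--             for event in acc:
--                 if later[event] < acc[event]:
--                     acc[event] = later[event]
--         out[name] = acc
--     return out
-- ===== Notes on version B (the rewrite author's own statement) =====
-- stated objective: alternative
-- what changed: A merges each comma-school into an accumulator dict in one pass with a membership test per school; B first builds a prefix->list-of-score-dicts grouping index in one pass, then folds each group down to its per-event minima in a second pass.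
import Mathlib
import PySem

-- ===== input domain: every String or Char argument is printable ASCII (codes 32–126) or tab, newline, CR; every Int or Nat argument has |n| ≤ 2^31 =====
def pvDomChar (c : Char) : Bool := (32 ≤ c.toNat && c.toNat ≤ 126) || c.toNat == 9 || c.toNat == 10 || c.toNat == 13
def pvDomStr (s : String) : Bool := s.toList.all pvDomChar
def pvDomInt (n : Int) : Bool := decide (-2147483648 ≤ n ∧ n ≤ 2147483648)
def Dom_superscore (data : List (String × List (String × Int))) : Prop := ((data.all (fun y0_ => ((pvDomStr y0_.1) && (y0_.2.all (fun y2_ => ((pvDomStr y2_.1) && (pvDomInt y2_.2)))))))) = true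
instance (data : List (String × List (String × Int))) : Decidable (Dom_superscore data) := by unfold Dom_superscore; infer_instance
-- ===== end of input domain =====

-- B re-decomposes A (group the comma schools' score dicts by name prefix in one pass, then
-- fold each group to its per-event minima) — 'alternative' objective, similar cost; the
-- equivalence is about the RETURN value (both Pythons mutate the input's inner dicts in
-- place, in the same way).

-- ===== PORT A =====
-- inner loop body: 'if data[school][event] < combined_results[school_name][event]: …';
-- Python raises KeyError when sd lacks the event (outside Pre_superscore; port skips)
def pvAInner (sd : PySem.Dict String Int) (d : PySem.Dict String Int) (q : String × Int) : PySem.Dict String Int :=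
  match PySem.Dict.get? sd q.1 with
  | some b => if b < PySem.Dict.getD d q.1 0 then PySem.Dict.insert d q.1 b else d
  | none => d

def pvAStep (cr : PySem.Dict String (PySem.Dict String Int)) (p : String × List (String × Int)) : PySem.Dict String (PySem.Dict String Int) :=
  if PySem.Str.isIn "," p.1 then
    let name := PySem.Str.slice p.1 none (some (PySem.Str.find p.1 ","))
    if PySem.Dict.contains cr name = false then
      PySem.Dict.insert cr name (PySem.Dict.mk p.2)
    else
      let cur := (PySem.Dict.get? cr name).getD PySem.Dict.empty
      PySem.Dict.insert cr name (cur.items.foldl (pvAInner (PySem.Dict.mk p.2)) cur)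
  else cr

def superscore (data : List (String × List (String × Int))) : List (String × List (String × Int)) :=
  ((data.foldl pvAStep PySem.Dict.empty).items).map (fun p => (p.1, p.2.items))

-- ===== PORT B =====
-- 'for event in acc: if later[event] < acc[event]: acc[event] = later[event]' — value-level
-- transcription of the in-place value overwrites (exact for distinct event keys, which
-- Pre_ guarantees; on the excluded KeyError inputs the Python raises and the port keeps q)
def pvMergeOne (acc : List (String × Int)) (later : List (String × Int)) : List (String × Int) :=
  acc.map (fun q =>
    match PySem.Dict.get? (PySem.Dict.mk later) q.1 with
    | some b => if b < q.2 then (q.1, b) else q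
    | none => q)

-- 'acc = ds[0]; for later in ds[1:]: …' ([] is unreachable: groups hold nonempty lists)
def pvMergeList : List (List (String × Int)) → List (String × Int)
  | [] => []
  | d :: rest => rest.foldl pvMergeOne d

-- 'i = school.find(","); if i != -1: groups.setdefault(school[:i], []).append(data[school])'
def pvBStep (g : PySem.Dict String (List (List (String × Int)))) (p : String × List (String × Int)) : PySem.Dict String (List (List (String × Int))) :=
  let i := PySem.Str.find p.1 ","
  if i ≠ -1 then
    PySem.Dict.modify g (PySem.Str.slice p.1 none (some i)) [] (fun l => l ++ [p.2])
  else g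

def superscore_alt (data : List (String × List (String × Int))) : List (String × List (String × Int)) :=
  ((data.foldl pvBStep PySem.Dict.empty).items).map (fun p => (p.1, pvMergeList p.2))

-- ===== PRECONDITION & SPEC =====
def pvHasComma (s : String) : Bool := PySem.Str.isIn "," s
def pvGroupName (s : String) : String := PySem.Str.slice s none (some (PySem.Str.find s ","))

-- school i is the first of its comma group
def pvFirstOfGroup (data : List (String × List (String × Int))) (i : Nat) : Bool :=
  (List.range i).all fun k => !(pvHasComma data[k]!.1 && (pvGroupName data[k]!.1 == pvGroupName data[i]!.1))

-- every event scored by the first school of a comma group is scored by each later member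
def pvNoMissingEvent (data : List (String × List (String × Int))) : Bool :=
  (List.range data.length).all fun j =>
    (List.range j).all fun i =>
      !(pvHasComma data[i]!.1 && pvHasComma data[j]!.1 &&
        (pvGroupName data[i]!.1 == pvGroupName data[j]!.1) && pvFirstOfGroup data i) ||
      (data[i]!.2.map Prod.fst).all (fun ev => (data[j]!.2.map Prod.fst).contains ev)

-- Pre_ excludes (a) association lists with duplicate outer or inner keys — they represent
-- no Python input, A's argument being a dict of dicts — and (b) exactly the inputs where A
-- raises KeyError: a comma school whose group's first member scores an event that a later
-- member lacks.  Every input representing a dict on which A returns satisfies Pre_.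
def Pre_superscore (data : List (String × List (String × Int))) : Prop :=
  (data.map Prod.fst).Nodup ∧
  (∀ p ∈ data, (p.2.map Prod.fst).Nodup) ∧
  pvNoMissingEvent data = true
instance (data : List (String × List (String × Int))) : Decidable (Pre_superscore data) := by
  unfold Pre_superscore; infer_instance

def pvWitness_superscore : (List (String × List (String × Int))) :=
  [("a,x", [("e", 3), ("f", 5)]), ("a,y", [("e", 1), ("f", 9), ("g", 2)]), ("b", [("h", 1)])]

def Spec_superscore (data : List (String × List (String × Int))) (out : List (String × List (String × Int))) : Prop := out = superscore_alt data
instance (data : List (String × List (String × Int))) (out : List (String × List (String × Int))) : Decidable (Spec_superscore data out) := by unfold Spec_superscore; infer_instance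

-- ===== CLAIM (what is proved, stated in full; the proofs are below) =====
def Claim_equal_superscore : Prop := ∀ (data : List (String × List (String × Int))), Dom_superscore data → Pre_superscore data → Spec_superscore data (superscore data)

-- ===== LEMMAS AND PROOFS =====

-- the per-entry effect of A's inner loop / B's merge on one (event, score) pair
def pvApply (sd : PySem.Dict String Int) (q : String × Int) : String × Int :=
  match PySem.Dict.get? sd q.1 with
  | some b => if b < q.2 then (q.1, b) else q
  | none => q

lemma pvMergeOne_eq (acc later : List (String × Int)) :
    pvMergeOne acc later = acc.map (pvApply (PySem.Dict.mk later)) := rfl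

lemma pvApply_fst (sd : PySem.Dict String Int) (q : String × Int) : (pvApply sd q).1 = q.1 := by
  unfold pvApply
  cases PySem.Dict.get? sd q.1 with
  | none => rfl
  | some b => by_cases h : b < q.2 <;> simp [h]

lemma pvMergeList_snoc (ds : List (List (String × Int))) (x : List (String × Int)) (h : ds ≠ []) :
    pvMergeList (ds ++ [x]) = pvMergeOne (pvMergeList ds) x := by
  cases ds with
  | nil => exact absurd rfl h
  | cons d rest => simp [pvMergeList, List.foldl_append]

-- A's inner loop over a snapshot of the keys, as a map over the items
lemma pvInnerFold_items (sd : PySem.Dict String Int) (l : List (String × Int)) (d : PySem.Dict String Int)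
    (hl : (l.map Prod.fst).Nodup) (hd : d.keys.Nodup)
    (hget : ∀ q ∈ l, PySem.Dict.get? d q.1 = some q.2) :
    (l.foldl (pvAInner sd) d).items
      = d.items.map (fun q => if q.1 ∈ l.map Prod.fst then pvApply sd q else q) := by
  induction l generalizing d with
  | nil => simp
  | cons q t ih =>
    simp only [List.map_cons, List.nodup_cons] at hl
    obtain ⟨hqt, htn⟩ := hl
    have hq : PySem.Dict.get? d q.1 = some q.2 := hget q (by simp)
    have hgt : ∀ r ∈ t, PySem.Dict.get? d r.1 = some r.2 := fun r hr => hget r (by simp [hr])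
    simp only [List.foldl_cons]
    have hstep : pvAInner sd d q =
        match PySem.Dict.get? sd q.1 with
        | some b => if b < PySem.Dict.getD d q.1 0 then PySem.Dict.insert d q.1 b else d
        | none => d := rfl
    cases hsd : PySem.Dict.get? sd q.1 with
    | none =>
      rw [hstep, hsd]
      rw [ih d htn hd hgt]
      refine List.map_congr_left (fun r hr => ?_)
      by_cases h1 : r.1 = q.1
      · have : ¬ r.1 ∈ t.map Prod.fst := by rw [h1]; exact hqt
        simp [h1, pvApply, hsd]
      · exact (if_congr (by simp [List.mem_cons, h1]) rfl rfl).symm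
    | some b =>
      have hgD : PySem.Dict.getD d q.1 0 = q.2 := PySem.Dict.getD_of_get?_eq_some d 0 hq
      rw [hstep, hsd, hgD]
      by_cases hlt : b < q.2
      · simp only [if_pos hlt]
        have hcont : PySem.Dict.contains d q.1 = true := by
          rw [PySem.Dict.contains_eq_isSome_get?, hq]; rfl
        have hd' : (PySem.Dict.insert d q.1 b).keys.Nodup := PySem.Dict.nodup_keys_insert _ _ _ hd
        have hgt' : ∀ r ∈ t, PySem.Dict.get? (PySem.Dict.insert d q.1 b) r.1 = some r.2 := by
          intro r hr
          have hne : r.1 ≠ q.1 := by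
            intro he; exact hqt (he ▸ List.mem_map_of_mem hr)
          rw [PySem.Dict.get?_insert_of_ne _ _ hne]; exact hgt r hr
        rw [ih (PySem.Dict.insert d q.1 b) htn hd' hgt']
        rw [PySem.Dict.items_insert_of_contains _ _ hcont, List.map_map]
        refine List.map_congr_left (fun r hr => ?_)
        by_cases h1 : r.1 = q.1
        · have hr2 : r.2 = q.2 := by
            have h2 : PySem.Dict.get? d r.1 = some r.2 :=
              PySem.Dict.get?_of_mem_items _ (by exact hr) hd
            rw [h1, hq] at h2; exact (Option.some_injective _ h2).symm
          have hnotin : ¬ q.1 ∈ t.map Prod.fst := hqt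
          simp only [Function.comp_apply, h1, beq_self_eq_true, if_pos]
          simp [hnotin, h1, pvApply, hsd, hlt, hr2]
        · have : (r.1 == q.1) = false := by simp [h1]
          simp only [Function.comp_apply, this, Bool.false_eq_true, if_false]
          exact (if_congr (by simp [List.mem_cons, h1]) rfl rfl).symm
      · simp only [if_neg hlt]
        rw [ih d htn hd hgt]
        refine List.map_congr_left (fun r hr => ?_)
        by_cases h1 : r.1 = q.1
        · have hr2 : r.2 = q.2 := by
            have h2 : PySem.Dict.get? d r.1 = some r.2 :=
              PySem.Dict.get?_of_mem_items _ (by exact hr) hd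
            rw [h1, hq] at h2; exact (Option.some_injective _ h2).symm
          have : ¬ r.1 ∈ t.map Prod.fst := by rw [h1]; exact hqt
          simp [h1, pvApply, hsd, hlt, hr2]
        · exact (if_congr (by simp [List.mem_cons, h1]) rfl rfl).symm

lemma pvMapRel {α β γ δ : Type} (f : α → γ) (f' : β → γ) (g1 : α → δ) (g2 : β → δ) :
    ∀ (l1 : List α) (l2 : List β), l1.map f = l2.map f' →
      (∀ a ∈ l1, ∀ b ∈ l2, f a = f' b → g1 a = g2 b) → l1.map g1 = l2.map g2 := by
  intro l1
  induction l1 with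
  | nil => intro l2 h _; cases l2 with
    | nil => rfl
    | cons b t => simp at h
  | cons a t ih =>
    intro l2 h hrel
    cases l2 with
    | nil => simp at h
    | cons b t2 =>
      simp only [List.map_cons, List.cons.injEq] at h
      simp only [List.map_cons, List.cons.injEq]
      exact ⟨hrel a (by simp) b (by simp) h.1,
        ih t2 h.2 (fun x hx y hy => hrel x (by simp [hx]) y (by simp [hy]))⟩

lemma pvAStep_no_comma (cr : PySem.Dict String (PySem.Dict String Int)) (p : String × List (String × Int))
    (h : PySem.Str.isIn "," p.1 = false) : pvAStep cr p = cr := by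
  unfold pvAStep; rw [h]; simp

lemma pvBStep_no_comma (g : PySem.Dict String (List (List (String × Int)))) (p : String × List (String × Int))
    (h : PySem.Str.find p.1 "," = -1) : pvBStep g p = g := by
  unfold pvBStep; rw [h]; simp

lemma pvBStep_comma (g : PySem.Dict String (List (List (String × Int)))) (p : String × List (String × Int))
    (h : PySem.Str.find p.1 "," ≠ -1) :
    pvBStep g p = PySem.Dict.insert g (pvGroupName p.1) ((PySem.Dict.getD g (pvGroupName p.1) []) ++ [p.2]) := by
  unfold pvBStep pvGroupName; rw [if_pos h]; rfl

lemma pvAStep_new (cr : PySem.Dict String (PySem.Dict String Int)) (p : String × List (String × Int))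
    (h : PySem.Str.isIn "," p.1 = true)
    (h2 : PySem.Dict.contains cr (pvGroupName p.1) = false) :
    pvAStep cr p = PySem.Dict.insert cr (pvGroupName p.1) (PySem.Dict.mk p.2) := by
  unfold pvAStep
  rw [h]
  simp only [if_true]
  rw [show (PySem.Str.slice p.1 none (some (PySem.Str.find p.1 ","))) = pvGroupName p.1 from rfl]
  rw [if_pos h2]

lemma pvAStep_merge (cr : PySem.Dict String (PySem.Dict String Int)) (p : String × List (String × Int))
    (h : PySem.Str.isIn "," p.1 = true)
    (h2 : PySem.Dict.contains cr (pvGroupName p.1) = true) :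
    pvAStep cr p = PySem.Dict.insert cr (pvGroupName p.1)
      (((PySem.Dict.get? cr (pvGroupName p.1)).getD PySem.Dict.empty).items.foldl
        (pvAInner (PySem.Dict.mk p.2)) ((PySem.Dict.get? cr (pvGroupName p.1)).getD PySem.Dict.empty)) := by
  unfold pvAStep
  rw [h]
  simp only [if_true]
  rw [show (PySem.Str.slice p.1 none (some (PySem.Str.find p.1 ","))) = pvGroupName p.1 from rfl]
  rw [if_neg (by rw [h2]; simp)]

-- the two folds agree, given the grouping invariant
lemma pv_loop (data : List (String × List (String × Int)))
    (cr : PySem.Dict String (PySem.Dict String Int))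
    (g : PySem.Dict String (List (List (String × Int))))
    (hdata : ∀ p ∈ data, (p.2.map Prod.fst).Nodup)
    (hcrk : cr.keys.Nodup) (hgk : g.keys.Nodup)
    (hvals : ∀ p ∈ cr.items, p.2.keys.Nodup)
    (hne : ∀ p ∈ g.items, p.2 ≠ [])
    (hinv : cr.items.map (fun p => (p.1, p.2.items)) = g.items.map (fun p => (p.1, pvMergeList p.2))) :
    ((data.foldl pvAStep cr).items).map (fun p => (p.1, p.2.items))
      = ((data.foldl pvBStep g).items).map (fun p => (p.1, pvMergeList p.2)) := by
  induction data generalizing cr g with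
  | nil => simpa using hinv
  | cons p rest ih =>
    have hkeys : cr.keys = g.keys := by
      have h := congrArg (List.map Prod.fst) hinv
      simpa [PySem.Dict.keys, List.map_map] using h
    have hp2 : (p.2.map Prod.fst).Nodup := hdata p (by simp)
    have hrest : ∀ q ∈ rest, (q.2.map Prod.fst).Nodup := fun q hq => hdata q (by simp [hq])
    simp only [List.foldl_cons]
    by_cases hc : PySem.Str.isIn "," p.1 = true
    · have hfind : PySem.Str.find p.1 "," ≠ -1 := by
        rw [PySem.Str.find_eq]
        exact (PySem.Chars.find_ne_neg_one_iff _ _).mpr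
          ((PySem.Chars.isIn_iff_infix _ _).mp (by rw [← PySem.Str.isIn_eq]; exact hc))
      set name := pvGroupName p.1 with hname
      have hBins : pvBStep g p = PySem.Dict.insert g name ((PySem.Dict.getD g name []) ++ [p.2]) := by
        rw [pvBStep_comma g p hfind, ← hname]
      by_cases hnc : PySem.Dict.contains cr name = false
      · -- new group
        have hA : pvAStep cr p = PySem.Dict.insert cr name (PySem.Dict.mk p.2) := by
          rw [pvAStep_new cr p hc (by rw [← hname]; exact hnc), ← hname]
        have hgcont : PySem.Dict.contains g name = false := by
          rw [PySem.Dict.contains_eq_decide_mem_keys] at hnc ⊢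
          rw [← hkeys]; exact hnc
        have hgetD : PySem.Dict.getD g name [] = [] := PySem.Dict.getD_of_not_contains _ _ hgcont
        rw [hA, hBins, hgetD]
        refine ih _ _ hrest ?_ ?_ ?_ ?_ ?_
        · exact PySem.Dict.nodup_keys_insert _ _ _ hcrk
        · exact PySem.Dict.nodup_keys_insert _ _ _ hgk
        · intro q hq
          rcases (PySem.Dict.mem_items_insert _ _ _ _).mp hq with h | h
          · subst h; simpa [PySem.Dict.keys] using hp2
          · exact hvals q h.1
        · intro q hq
          rcases (PySem.Dict.mem_items_insert _ _ _ _).mp hq with h | h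
          · subst h; simp
          · exact hne q h.1
        · rw [PySem.Dict.items_insert_of_not_contains _ _ hnc,
              PySem.Dict.items_insert_of_not_contains _ _ hgcont]
          simp only [List.map_append, List.map_cons, List.map_nil]
          rw [hinv]
          rfl
      · -- existing group: merge
        have hnc' : PySem.Dict.contains cr name = true := by
          cases h : PySem.Dict.contains cr name
          · exact absurd h hnc
          · rfl
        have hA : pvAStep cr p = PySem.Dict.insert cr name
            (((PySem.Dict.get? cr name).getD PySem.Dict.empty).items.foldl
              (pvAInner (PySem.Dict.mk p.2)) ((PySem.Dict.get? cr name).getD PySem.Dict.empty)) := by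
          rw [pvAStep_merge cr p hc (by rw [← hname]; exact hnc'), ← hname]
        have hsome : (PySem.Dict.get? cr name).isSome := by
          rw [← PySem.Dict.contains_eq_isSome_get?]; exact hnc'
        obtain ⟨cur, hcur⟩ : ∃ cur, PySem.Dict.get? cr name = some cur :=
          Option.isSome_iff_exists.mp hsome
        have hmemA : (name, cur) ∈ cr.items := PySem.Dict.mem_items_of_get?_eq_some _ hcur
        have hcurk : cur.keys.Nodup := hvals _ hmemA
        -- the corresponding group
        have hmm : ((name, cur.items) : String × List (String × Int))
            ∈ g.items.map (fun p => (p.1, pvMergeList p.2)) := by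
          rw [← hinv]; exact List.mem_map.mpr ⟨(name, cur), hmemA, rfl⟩
        obtain ⟨b, hbmem, hbeq⟩ := List.mem_map.mp hmm
        have hb1 : b.1 = name := (Prod.mk.injEq _ _ _ _ ▸ hbeq).1
        have hb2 : pvMergeList b.2 = cur.items := (Prod.mk.injEq _ _ _ _ ▸ hbeq).2
        have hbmem' : (name, b.2) ∈ g.items := by rw [← hb1]; exact hbmem
        have hgget : PySem.Dict.get? g name = some b.2 :=
          PySem.Dict.get?_of_mem_items _ hbmem' hgk
        have hds0 : b.2 ≠ [] := hne b hbmem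
        have hgetD : PySem.Dict.getD g name [] = b.2 := PySem.Dict.getD_of_get?_eq_some _ [] hgget
        -- A's merged value
        set cur' := (cur.items.foldl (pvAInner (PySem.Dict.mk p.2)) cur) with hcur'def
        have hcurkeys : (cur.items.map Prod.fst).Nodup := by
          simpa [PySem.Dict.keys] using hcurk
        have hcuritems : cur'.items = pvMergeOne cur.items p.2 := by
          rw [hcur'def, pvInnerFold_items _ _ _ hcurkeys hcurk
            (fun q hq => PySem.Dict.get?_of_mem_items _ (by exact hq) hcurk)]
          rw [pvMergeOne_eq]
          exact List.map_congr_left (fun q hq => by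
            simp [List.mem_map.mpr ⟨q, hq, rfl⟩])
        have hcur'keys : cur'.keys.Nodup := by
          have : cur'.keys = cur.keys := by
            simp only [PySem.Dict.keys, hcuritems, pvMergeOne_eq, List.map_map]
            exact List.map_congr_left (fun q _ => pvApply_fst _ q)
          rw [this]; exact hcurk
        rw [hA, hcur, Option.getD_some, hBins, hgetD, ← hcur'def]
        refine ih _ _ hrest ?_ ?_ ?_ ?_ ?_
        · exact PySem.Dict.nodup_keys_insert _ _ _ hcrk
        · exact PySem.Dict.nodup_keys_insert _ _ _ hgk
        · intro q hq
          rcases (PySem.Dict.mem_items_insert _ _ _ _).mp hq with h | h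
          · subst h; exact hcur'keys
          · exact hvals q h.1
        · intro q hq
          rcases (PySem.Dict.mem_items_insert _ _ _ _).mp hq with h | h
          · subst h; simp
          · exact hne q h.1
        · rw [PySem.Dict.items_insert_of_contains _ _ hnc']
          have hgcont' : PySem.Dict.contains g name = true := by
            rw [PySem.Dict.contains_eq_isSome_get?, hgget]; rfl
          rw [PySem.Dict.items_insert_of_contains _ _ hgcont']
          rw [List.map_map, List.map_map]
          apply pvMapRel _ _ _ _ _ _ hinv
          intro a ha bb hbb heq
          have ha1 : a.1 = bb.1 := (Prod.mk.injEq _ _ _ _ ▸ heq).1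
          have ha2 : a.2.items = pvMergeList bb.2 := (Prod.mk.injEq _ _ _ _ ▸ heq).2
          by_cases h1 : a.1 = name
          · have e1 : (a.1 == name) = true := by simp [h1]
            have e2 : (bb.1 == name) = true := by simp [← ha1, h1]
            simp only [Function.comp_apply, e1, e2, if_pos]
            refine congrArg (Prod.mk name) ?_
            rw [hcuritems, pvMergeList_snoc _ _ hds0, hb2]
          · have e1 : (a.1 == name) = false := by simp [h1]
            have e2 : (bb.1 == name) = false := by simp [← ha1, h1]
            simp only [Function.comp_apply, e1, e2, Bool.false_eq_true, if_false]
            exact heq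
    · -- no comma: both steps are the identity
      have hc' : PySem.Str.isIn "," p.1 = false := by
        cases h : PySem.Str.isIn "," p.1
        · rfl
        · exact absurd h hc
      have hfind : PySem.Str.find p.1 "," = -1 := by
        rw [PySem.Str.find_eq]
        exact (PySem.Chars.find_eq_neg_one_iff _ _).mpr (by
          intro hinf
          exact hc (by rw [PySem.Str.isIn_eq]; exact (PySem.Chars.isIn_iff_infix _ _).mpr hinf))
      have hA : pvAStep cr p = cr := pvAStep_no_comma cr p hc'
      have hB : pvBStep g p = g := pvBStep_no_comma g p hfind
      rw [hA, hB]
      exact ih cr g hrest hcrk hgk hvals hne hinv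

-- ===== VERDICT (by name: the statement is the Claim_ definition above) =====
theorem superscore_spec : Claim_equal_superscore := by
  intro data _ hpre
  unfold Spec_superscore superscore superscore_alt
  exact pv_loop data PySem.Dict.empty PySem.Dict.empty hpre.2.1
    (by simp [PySem.Dict.keys, PySem.Dict.empty])
    (by simp [PySem.Dict.keys, PySem.Dict.empty])
    (by intro p hp; simp [PySem.Dict.empty] at hp)
    (by intro p hp; simp [PySem.Dict.empty] at hp)
    (by simp [PySem.Dict.empty])
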